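-- pv_equiv track=rewrite | github.com/9LEWANDOWSKI9/Some-attempts-and-failing-ideas | afsdnn.py | ei_multiply_nd
-- ===== SOURCE A (Python) =====
-- def ei_reduce_nd(concepts):
--     result = []
--     concepts.sort(key=lambda x: len(x))
--     for concept in concepts:
--         contain = False
--         if len(result) == 0:
--             result.append(concept)
--         else:
--             for r in result:
--                 if set(concept).issuperset(r):
--                     contain = True
--                     break
--             if not contain:
--                 result.append(concept)
--     return result
--
-- def ei_multiply_nd(conceptA, conceptB):
--     result = []
--     for aConcept in conceptA:
--         for bConcept in conceptB:
--             conceptTmp = set()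
--             conceptTmp.update(aConcept)
--             conceptTmp.update(bConcept)
--             result.append(conceptTmp)
--     result = ei_reduce_nd(result)
--     return result
-- ===== SOURCE B (Python) =====
-- def ei_multiply_nd(conceptA, conceptB):
--     # all pairwise unions, in the same outer-A/inner-B order
--     pairs = [set(a) | set(b) for a in conceptA for b in conceptB]
--     # keep a set iff no other set is a proper subset of it and it is the
--     # first occurrence among sets equal to it (all-pairs minimality test)
--     keep = [s for i, s in enumerate(pairs)
--             if not any(t < s or (t == s and j < i) for j, t in enumerate(pairs))]
--     keep.sort(key=len)
--     return keep
-- ===== Notes on version B (the rewrite author's own statement) =====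
-- stated objective: alternative
-- what changed: Instead of sorting the pairwise unions by size first and then incrementally keeping sets that contain no already-kept set, B keeps a set directly by a global all-pairs minimality test (no other set is a proper subset of it, and it is the first occurrence among equal sets) and only then stable-sorts the survivors by size.
import Mathlib
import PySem

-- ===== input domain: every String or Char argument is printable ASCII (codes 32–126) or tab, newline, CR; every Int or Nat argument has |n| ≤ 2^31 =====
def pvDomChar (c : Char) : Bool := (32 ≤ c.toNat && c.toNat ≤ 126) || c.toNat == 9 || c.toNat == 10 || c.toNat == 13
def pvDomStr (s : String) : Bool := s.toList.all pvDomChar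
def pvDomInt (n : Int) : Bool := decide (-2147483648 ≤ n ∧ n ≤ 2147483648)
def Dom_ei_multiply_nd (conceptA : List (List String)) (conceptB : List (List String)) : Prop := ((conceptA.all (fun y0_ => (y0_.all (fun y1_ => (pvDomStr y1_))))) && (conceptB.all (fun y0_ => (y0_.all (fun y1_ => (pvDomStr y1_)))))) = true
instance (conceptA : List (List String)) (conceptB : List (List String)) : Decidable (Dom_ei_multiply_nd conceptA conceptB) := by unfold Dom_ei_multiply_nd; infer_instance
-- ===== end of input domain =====

-- B replaces A's sort-then-incremental superset reduction by a global all-pairs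
-- minimality test followed by a stable sort of the survivors (alternative decomposition,
-- same asymptotic cost). A sorts a fresh local list in place; no caller-visible mutation.


-- ===== PORT A =====
def ei_reduce_nd (concepts : List (List String)) : List (List String) :=
  let concepts' := PySem.List.sorted concepts (fun x => x.length)
  concepts'.foldl (fun result concept =>
    if result.length = 0 then
      result ++ [concept]
    else
      if result.any (fun r => PySem.Set.issuperset (PySem.Set.ofList concept) r) then
        result
      else
        result ++ [concept]) []

def ei_multiply_nd (conceptA : List (List String)) (conceptB : List (List String)) : List (List String) :=
  let result := conceptA.foldl (fun acc aConcept =>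
    conceptB.foldl (fun acc2 bConcept =>
      acc2 ++ [PySem.Set.update (PySem.Set.update PySem.Set.empty aConcept) bConcept]) acc) []
  ei_reduce_nd result

-- ===== PORT B =====
-- Python's 't < s' on sets: proper subset
def pyProperSubset (t s : List String) : Bool :=
  PySem.Set.issubset t s && !(PySem.Set.issubset s t)

def ei_multiply_nd_alt (conceptA : List (List String)) (conceptB : List (List String)) : List (List String) :=
  let pairs := conceptA.flatMap (fun a =>
    conceptB.map (fun b => PySem.Set.union (PySem.Set.ofList a) (PySem.Set.ofList b)))
  let keep := ((PySem.List.enumerate pairs).filter (fun p =>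
      !((PySem.List.enumerate pairs).any (fun q =>
        pyProperSubset q.2 p.2 || (PySem.Set.equal q.2 p.2 && decide (q.1 < p.1)))))).map (·.2)
  PySem.List.sorted keep (fun s => s.length)

-- ===== PRECONDITION & SPEC =====
def Spec_ei_multiply_nd (conceptA : List (List String)) (conceptB : List (List String)) (out : List (List String)) : Prop := out = ei_multiply_nd_alt conceptA conceptB
instance (conceptA : List (List String)) (conceptB : List (List String)) (out : List (List String)) : Decidable (Spec_ei_multiply_nd conceptA conceptB out) := by unfold Spec_ei_multiply_nd; infer_instance

-- ===== CLAIM (what is proved, stated in full; the proofs are below) =====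
def Claim_equal_ei_multiply_nd : Prop := ∀ (conceptA : List (List String)) (conceptB : List (List String)), Dom_ei_multiply_nd conceptA conceptB → Spec_ei_multiply_nd conceptA conceptB (ei_multiply_nd conceptA conceptB)

-- ===== LEMMAS AND PROOFS =====

-- subset-of as a proposition ('every member of s is a member of t')
def subP (s t : List String) : Prop := ∀ x ∈ s, x ∈ t

-- the lexicographic (length, original index) key that names A's stable sort order
def kf (p : Int × List String) : Int ×ₗ Int := toLex ((p.2.length : Int), p.1)

-- the same strict order, spelled out
def ltk (q p : Int × List String) : Prop :=
  q.2.length < p.2.length ∨ (q.2.length = p.2.length ∧ q.1 < p.1)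

-- what A's reduction loop keeps: c survives iff no element seen before it is a subset of it
def keepFrom (seen : List (List String)) : List (List String) → List (List String)
  | [] => []
  | c :: rest =>
      if seen.any (fun t => PySem.Set.issubset t c) then keepFrom (seen ++ [c]) rest
      else c :: keepFrom (seen ++ [c]) rest

theorem ltk_asymm (q p : Int × List String) : ltk q p → ltk p q → False := by
  simp only [ltk]; omega

-- Bool twin of ltk
def ltkB (q p : Int × List String) : Bool :=
  decide (q.2.length < p.2.length) || (decide (q.2.length = p.2.length) && decide (q.1 < p.1))

theorem ltkB_eq (q p : Int × List String) : ltkB q p = true ↔ ltk q p := by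
  simp [ltkB, ltk]

theorem issubset_iff (s t : List String) : PySem.Set.issubset s t = true ↔ subP s t := by
  simp [PySem.Set.issubset, subP, List.all_eq_true]

theorem issubset_ofList_right (r c : List String) :
    PySem.Set.issubset r (PySem.Set.ofList c) = PySem.Set.issubset r c := by
  rw [Bool.eq_iff_iff]
  simp [PySem.Set.issubset, List.all_eq_true, PySem.Set.mem_ofList]

theorem kf_lt_iff (q p : Int × List String) : kf q < kf p ↔ ltk q p := by
  simp only [kf, ltk, Prod.Lex.toLex_lt_toLex]
  omega

theorem foldl_add_ofList (b : List String) (s : PySem.Set String) :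
    (PySem.Set.ofList b).foldl PySem.Set.add s = b.foldl PySem.Set.add s := by
  induction b using List.reverseRecOn generalizing s with
  | nil => simp [PySem.Set.ofList]
  | append_singleton b x ih =>
    have hof : PySem.Set.ofList (b ++ [x]) = (PySem.Set.ofList b).add x := by
      simp [PySem.Set.ofList_eq_foldl, List.foldl_append]
    rw [hof, List.foldl_append, List.foldl_cons, List.foldl_nil, ← ih s]
    by_cases hc : (PySem.Set.ofList b).contains x = true
    · rw [show (PySem.Set.ofList b).add x = PySem.Set.ofList b from by
        simp only [PySem.Set.add, if_pos hc]]
      have hxb : x ∈ b :=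
        (PySem.Set.mem_ofList b x).mp ((PySem.Set.contains_iff _ x).mp hc)
      have hxmem : x ∈ (PySem.Set.ofList b).foldl PySem.Set.add s := by
        rw [ih s]
        clear ih hof hc
        induction b generalizing s with
        | nil => simp at hxb
        | cons y b ih2 =>
          rcases List.mem_cons.mp hxb with rfl | hxb'
          · simp only [List.foldl_cons]
            clear hxb ih2
            induction b generalizing s with
            | nil => simp [PySem.Set.mem_add]
            | cons z b ih3 => simpa [List.foldl_cons] using ih3 (PySem.Set.add s x |>.add z)
          · simpa [List.foldl_cons] using ih2 (s.add y) hxb' 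
      rw [show PySem.Set.add ((PySem.Set.ofList b).foldl PySem.Set.add s) x
          = (PySem.Set.ofList b).foldl PySem.Set.add s from by
        simp only [PySem.Set.add, if_pos ((PySem.Set.contains_iff _ x).mpr hxmem)]]
    · rw [show (PySem.Set.ofList b).add x = PySem.Set.ofList b ++ [x] from by
        simp only [PySem.Set.add, if_neg hc]]
      rw [List.foldl_append, List.foldl_cons, List.foldl_nil]

theorem union_ofList (a b : List String) :
    PySem.Set.union (PySem.Set.ofList a) (PySem.Set.ofList b) = PySem.Set.ofList (a ++ b) := by
  simp only [PySem.Set.union, PySem.Set.update, PySem.Set.ofList_eq_foldl, List.foldl_append]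
  exact foldl_add_ofList b _

-- the pairwise-union list both programs build
def pairsOf (conceptA conceptB : List (List String)) : List (List String) :=
  conceptA.flatMap (fun a => conceptB.map (fun b => PySem.Set.ofList (a ++ b)))

theorem a_result_eq_pairs (conceptA conceptB : List (List String)) :
    conceptA.foldl (fun acc aConcept =>
      conceptB.foldl (fun acc2 bConcept =>
        acc2 ++ [PySem.Set.update (PySem.Set.update PySem.Set.empty aConcept) bConcept]) acc) []
    = pairsOf conceptA conceptB := by
  unfold pairsOf
  have h1 : ∀ (a : List String) (acc : List (List String)),
      conceptB.foldl (fun acc2 b =>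
        acc2 ++ [PySem.Set.update (PySem.Set.update PySem.Set.empty a) b]) acc
        = acc ++ conceptB.map (fun b => PySem.Set.ofList (a ++ b)) := by
    intro a acc
    have hupd : ∀ b : List String,
        PySem.Set.update (PySem.Set.update PySem.Set.empty a) b = PySem.Set.ofList (a ++ b) := by
      intro b
      simp [PySem.Set.ofList, PySem.Set.update, PySem.Set.empty, List.foldl_append]
    simp only [hupd]
    exact PySem.List.foldl_append_singleton_eq_map _ _ _
  rw [show (fun (acc : List (List String)) (aConcept : List String) =>
        conceptB.foldl (fun acc2 bConcept =>
          acc2 ++ [PySem.Set.update (PySem.Set.update PySem.Set.empty aConcept) bConcept]) acc)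
      = (fun acc a => acc ++ conceptB.map (fun b => PySem.Set.ofList (a ++ b)))
      from funext fun acc => funext fun a => h1 a acc]
  rw [PySem.List.foldl_append_eq_flatMap]
  simp

theorem reduce_go (rest res seen : List (List String))
    (hinv : ∀ c, (∃ t ∈ res, subP t c) ↔ (∃ t ∈ seen, subP t c)) :
    rest.foldl (fun result concept =>
      if result.length = 0 then
        result ++ [concept]
      else
        if result.any (fun r => PySem.Set.issuperset (PySem.Set.ofList concept) r) then
          result
        else
          result ++ [concept]) res
    = res ++ keepFrom seen rest := by
  induction rest generalizing res seen with
  | nil => simp [keepFrom]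
  | cons c rest ih =>
    simp only [List.foldl_cons, keepFrom]
    by_cases hex : ∃ t ∈ res, subP t c
    · have hseen : seen.any (fun t => PySem.Set.issubset t c) = true := by
        obtain ⟨t, ht, hsub⟩ := (hinv c).mp hex
        exact List.any_eq_true.mpr ⟨t, ht, (issubset_iff t c).mpr hsub⟩
      have hres : res.any (fun r => PySem.Set.issuperset (PySem.Set.ofList c) r) = true := by
        obtain ⟨t, ht, hsub⟩ := hex
        refine List.any_eq_true.mpr ⟨t, ht, ?_⟩
        show PySem.Set.issuperset (PySem.Set.ofList c) t = true
        simp only [PySem.Set.issuperset, issubset_ofList_right]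
        exact (issubset_iff t c).mpr hsub
      have hne : ¬ res.length = 0 := by
        obtain ⟨t, ht, _⟩ := hex
        intro h
        rw [List.length_eq_zero_iff] at h
        subst h; simp at ht
      rw [if_neg hne, if_pos hres, if_pos hseen]
      refine ih res (seen ++ [c]) (fun c' => ?_)
      constructor
      · intro h
        obtain ⟨t, ht, hsub⟩ := (hinv c').mp h
        exact ⟨t, List.mem_append_left _ ht, hsub⟩
      · rintro ⟨t, ht, hsub⟩
        rcases List.mem_append.mp ht with ht' | ht'
        · exact (hinv c').mpr ⟨t, ht', hsub⟩
        · rw [List.mem_singleton] at ht'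
          subst ht'
          obtain ⟨r, hr, hrc⟩ := hex
          exact ⟨r, hr, fun x hx => hsub x (hrc x hx)⟩
    · have hseen : ¬ seen.any (fun t => PySem.Set.issubset t c) = true := by
        intro h
        obtain ⟨t, ht, hsub⟩ := List.any_eq_true.mp h
        exact hex ((hinv c).mpr ⟨t, ht, (issubset_iff t c).mp hsub⟩)
      have hstep : (if res.length = 0 then res ++ [c]
          else if res.any (fun r => PySem.Set.issuperset (PySem.Set.ofList c) r) then res
          else res ++ [c]) = res ++ [c] := by
        by_cases hlen : res.length = 0
        · rw [if_pos hlen]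
        · rw [if_neg hlen, if_neg]
          intro h
          obtain ⟨t, ht, hsub⟩ := List.any_eq_true.mp h
          simp only [PySem.Set.issuperset, issubset_ofList_right] at hsub
          exact hex ⟨t, ht, (issubset_iff t c).mp hsub⟩
      rw [hstep, if_neg hseen]
      have hinv' : ∀ c', (∃ t ∈ res ++ [c], subP t c') ↔ (∃ t ∈ seen ++ [c], subP t c') := by
        intro c'
        constructor
        · rintro ⟨t, ht, hsub⟩
          rcases List.mem_append.mp ht with ht' | ht'
          · obtain ⟨u, hu, husub⟩ := (hinv c').mp ⟨t, ht', hsub⟩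
            exact ⟨u, List.mem_append_left _ hu, husub⟩
          · exact ⟨t, List.mem_append_right _ ht', hsub⟩
        · rintro ⟨t, ht, hsub⟩
          rcases List.mem_append.mp ht with ht' | ht'
          · obtain ⟨u, hu, husub⟩ := (hinv c').mpr ⟨t, ht', hsub⟩
            exact ⟨u, List.mem_append_left _ hu, husub⟩
          · exact ⟨t, List.mem_append_right _ ht', hsub⟩
      rw [ih (res ++ [c]) (seen ++ [c]) hinv']
      simp

theorem keepFrom_filter (rest processed : List (Int × List String))
    (hpw : (processed ++ rest).Pairwise ltk) :
    keepFrom (processed.map (·.2)) (rest.map (·.2)) =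
      (rest.filter (fun p =>
        !((processed ++ rest).any (fun q => ltkB q p && PySem.Set.issubset q.2 p.2)))).map (·.2) := by
  induction rest generalizing processed with
  | nil => simp [keepFrom]
  | cons p rest ih =>
    obtain ⟨hproc, hcons, hcross⟩ := List.pairwise_append.mp hpw
    have h1 : ∀ q ∈ processed, ltk q p := fun q hq => hcross q hq p (List.mem_cons_self)
    have h2 : ∀ q ∈ rest, ltk p q := (List.pairwise_cons.mp hcons).1
    have hmain : (processed.map (·.2)).any (fun t => PySem.Set.issubset t p.2)
        = ((processed ++ p :: rest).any fun q => ltkB q p && PySem.Set.issubset q.2 p.2) := by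
      rw [Bool.eq_iff_iff]
      simp only [List.any_eq_true, List.mem_map, List.mem_append, List.mem_cons,
        Bool.and_eq_true]
      constructor
      · rintro ⟨t, ⟨q, hq, rfl⟩, hsub⟩
        exact ⟨q, Or.inl hq, (ltkB_eq q p).mpr (h1 q hq), hsub⟩
      · rintro ⟨q, hqmem, hltk, hsub⟩
        rw [ltkB_eq] at hltk
        rcases hqmem with hq | hq | hq
        · exact ⟨q.2, ⟨q, hq, rfl⟩, hsub⟩
        · rw [hq] at hltk; exact absurd hltk (fun h => ltk_asymm p p h h)
        · exact absurd hltk (fun h => ltk_asymm q p h (h2 q hq))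
    rw [List.append_cons] at hpw
    rw [List.append_cons] at hmain
    rw [List.append_cons]
    simp only [List.map_cons, keepFrom, List.filter_cons]
    by_cases hany : ((processed ++ [p] ++ rest).any
        fun q => ltkB q p && PySem.Set.issubset q.2 p.2) = true
    · rw [if_pos (hmain.trans hany), if_neg (by simp only [hany, Bool.not_true]; simp)]
      have := ih (processed ++ [p]) hpw
      simpa [List.map_append] using this
    · have hf := Bool.eq_false_iff.mpr hany
      rw [if_neg (fun h => hany (hmain.symm.trans h)), if_pos (by simp only [hf, Bool.not_false])]
      have := ih (processed ++ [p]) hpw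
      simp only [List.map_append, List.map_cons, List.map_nil] at this
      simp [this]

theorem insertBy_map_snd (x : Int × List String) (G : List (Int × List String))
    (h : ∀ g ∈ G, g.1 < x.1) :
    (PySem.List.insertBy (fun a b => decide (kf a < kf b)) x G).map (·.2)
      = PySem.List.insertBy (fun a b => decide (a.length < b.length)) x.2 (G.map (·.2)) := by
  induction G with
  | nil => simp [PySem.List.insertBy]
  | cons g G ih =>
    have hg : g.1 < x.1 := h g List.mem_cons_self
    have hiff : kf x < kf g ↔ x.2.length < g.2.length := by
      rw [kf_lt_iff]; simp only [ltk]; omega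
    simp only [PySem.List.insertBy, List.map_cons]
    by_cases hc : x.2.length < g.2.length
    · rw [if_pos (decide_eq_true (hiff.mpr hc)), if_pos (decide_eq_true hc)]
      simp
    · rw [if_neg (fun hh => hc (hiff.mp (of_decide_eq_true hh))),
          if_neg (fun hh => hc (of_decide_eq_true hh))]
      simp only [List.map_cons]
      rw [ih (fun g' hg' => h g' (List.mem_cons_of_mem _ hg'))]

theorem sort_bridge (G : List (Int × List String))
    (h : G.Pairwise (fun a b => a.1 < b.1)) :
    PySem.List.sorted (G.map (·.2)) (fun s => s.length)
      = (PySem.List.sorted G kf).map (·.2) := by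
  induction G using List.reverseRecOn with
  | nil => simp [PySem.List.sorted]
  | append_singleton G x ih =>
    obtain ⟨hG, -, hcross⟩ := List.pairwise_append.mp h
    have hlt : ∀ g ∈ G, g.1 < x.1 := fun g hg => hcross g hg x (List.mem_singleton_self x)
    rw [List.map_append, List.map_singleton,
        PySem.List.sorted_eq_foldl_insertBy, PySem.List.sorted_eq_foldl_insertBy,
        List.foldl_append, List.foldl_append]
    simp only [List.foldl_cons, List.foldl_nil]
    rw [← PySem.List.sorted_eq_foldl_insertBy, ← PySem.List.sorted_eq_foldl_insertBy, ih hG,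
        insertBy_map_snd x _ (fun g hg => hlt g ((PySem.List.mem_sorted _ _ _ g).mp hg))]

theorem pairwise_kf_lt_sorted (P : List (List String)) :
    (PySem.List.sorted (PySem.List.enumerate P 0) kf).Pairwise (fun a b => kf a < kf b) := by
  have hle := PySem.List.sorted_pairwise (PySem.List.enumerate P 0) kf
  have hndE : ((PySem.List.enumerate P 0).map (·.1)).Nodup :=
    (List.pairwise_map).mpr ((PySem.List.pairwise_lt_enumerate P 0).imp fun h => Int.ne_of_lt h)
  have hndS : ((PySem.List.sorted (PySem.List.enumerate P 0) kf).map (·.1)).Nodup :=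
    (((PySem.List.sorted_perm (PySem.List.enumerate P 0) kf false).map (·.1)).nodup_iff).mpr hndE
  rw [List.pairwise_iff_getElem] at hle ⊢
  intro i j hi hj hij
  refine lt_of_le_of_ne (hle i j hi hj hij) ?_
  intro heq
  have h1 : (PySem.List.sorted (PySem.List.enumerate P 0) kf)[i].1
      = (PySem.List.sorted (PySem.List.enumerate P 0) kf)[j].1 := by
    have h2 := congrArg (fun z => (ofLex z).2) heq
    simpa [kf] using h2
  have h3 : i = j := by
    refine (hndS.getElem_inj_iff (hi := by simpa using hi) (hj := by simpa using hj)).mp ?_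
    simpa using h1
  omega

theorem sorted_filter_comm (P : List (List String)) (c : Int × List String → Bool) :
    PySem.List.sorted ((PySem.List.enumerate P 0).filter c) kf
      = (PySem.List.sorted (PySem.List.enumerate P 0) kf).filter c := by
  refine PySem.List.sorted_eq_of_perm_of_pairwise_lt _ _ _ ?_ ?_
  · exact (PySem.List.sorted_perm (PySem.List.enumerate P 0) kf false).filter c
  · exact List.Pairwise.sublist (List.filter_sublist) (pairwise_kf_lt_sorted P)

theorem issubset_eq_false_iff (s t : List String) :
    PySem.Set.issubset s t = false ↔ ¬ subP s t := by
  rw [Bool.eq_false_iff]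
  exact not_congr (issubset_iff s t)

theorem subP_length_le {s t : List String} (hs : s.Nodup) (ht : t.Nodup)
    (h : subP s t) : s.length ≤ t.length := by
  rw [← List.toFinset_card_of_nodup hs, ← List.toFinset_card_of_nodup ht]
  exact Finset.card_le_card (fun x hx => List.mem_toFinset.mpr (h x (List.mem_toFinset.mp hx)))

theorem subP_of_length_le {s t : List String} (hs : s.Nodup) (ht : t.Nodup)
    (h : subP s t) (hl : t.length ≤ s.length) : subP t s := by
  have hsub : s.toFinset ⊆ t.toFinset :=
    fun x hx => List.mem_toFinset.mpr (h x (List.mem_toFinset.mp hx))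
  have hcard : t.toFinset.card ≤ s.toFinset.card := by
    rw [List.toFinset_card_of_nodup hs, List.toFinset_card_of_nodup ht]; exact hl
  have heq := Finset.eq_of_subset_of_card_le hsub hcard
  intro x hx
  exact List.mem_toFinset.mp (heq ▸ List.mem_toFinset.mpr hx)

theorem cond_conv (P : List (List String)) (hnd : ∀ s ∈ P, s.Nodup)
    (p : Int × List String) (hp : p ∈ PySem.List.enumerate P 0) :
    ((PySem.List.enumerate P 0).any (fun q =>
        pyProperSubset q.2 p.2 || (PySem.Set.equal q.2 p.2 && decide (q.1 < p.1))))
      = ((PySem.List.enumerate P 0).any (fun q => ltkB q p && PySem.Set.issubset q.2 p.2)) := by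
  have hmem : ∀ q : Int × List String, q ∈ PySem.List.enumerate P 0 → q.2 ∈ P := by
    intro q hq
    obtain ⟨k, hk, rfl⟩ := (PySem.List.mem_enumerate_iff P 0 q).mp hq
    exact List.getElem_mem hk
  have hpnd : p.2.Nodup := hnd _ (hmem p hp)
  rw [Bool.eq_iff_iff]
  simp only [List.any_eq_true, Bool.or_eq_true, Bool.and_eq_true, pyProperSubset,
    PySem.Set.equal, ltkB, Bool.not_eq_true', decide_eq_true_eq]
  constructor
  · rintro ⟨q, hq, hcond⟩
    have hqnd : q.2.Nodup := hnd _ (hmem q hq)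
    refine ⟨q, hq, ?_⟩
    rcases hcond with ⟨hsub, hnsub⟩ | ⟨⟨hsub, hsub'⟩, hij⟩
    · rw [issubset_iff] at hsub
      rw [issubset_eq_false_iff] at hnsub
      refine ⟨Or.inl ?_, (issubset_iff _ _).mpr hsub⟩
      rcases lt_or_eq_of_le (subP_length_le hqnd hpnd hsub) with h | h
      · exact h
      · exact absurd (subP_of_length_le hqnd hpnd hsub (le_of_eq h.symm)) hnsub
    · rw [issubset_iff] at hsub hsub'
      exact ⟨Or.inr ⟨le_antisymm (subP_length_le hqnd hpnd hsub)
        (subP_length_le hpnd hqnd hsub'), hij⟩, (issubset_iff _ _).mpr hsub⟩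
  · rintro ⟨q, hq, hlen, hsub⟩
    have hqnd : q.2.Nodup := hnd _ (hmem q hq)
    rw [issubset_iff] at hsub
    refine ⟨q, hq, ?_⟩
    rcases hlen with h | ⟨h, hij⟩
    · refine Or.inl ⟨(issubset_iff _ _).mpr hsub, (issubset_eq_false_iff _ _).mpr ?_⟩
      intro hcontra
      exact absurd (subP_length_le hpnd hqnd hcontra) (by omega)
    · exact Or.inr ⟨⟨(issubset_iff _ _).mpr hsub,
        (issubset_iff _ _).mpr (subP_of_length_le hqnd hpnd hsub (le_of_eq h.symm))⟩, hij⟩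

theorem main_eq (P : List (List String)) (hnd : ∀ s ∈ P, s.Nodup) :
    ei_reduce_nd P
      = PySem.List.sorted
          (((PySem.List.enumerate P 0).filter (fun p =>
            !((PySem.List.enumerate P 0).any (fun q =>
              pyProperSubset q.2 p.2 || (PySem.Set.equal q.2 p.2 && decide (q.1 < p.1)))))).map (·.2))
          (fun s => s.length) := by
  have hSpw : (PySem.List.sorted (PySem.List.enumerate P 0) kf).Pairwise ltk :=
    (pairwise_kf_lt_sorted P).imp fun h => (kf_lt_iff _ _).mp h
  simp only [ei_reduce_nd]
  rw [reduce_go (PySem.List.sorted P fun x => x.length) [] [] (by intro c; simp)]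
  rw [List.nil_append]
  have hsb := sort_bridge (PySem.List.enumerate P 0) (PySem.List.pairwise_lt_enumerate P 0)
  rw [PySem.List.map_snd_enumerate] at hsb
  rw [hsb]
  have hK := keepFrom_filter (PySem.List.sorted (PySem.List.enumerate P 0) kf) []
    (by simpa using hSpw)
  simp only [List.map_nil, List.nil_append] at hK
  rw [hK]
  have hfilfst : ((PySem.List.enumerate P 0).filter (fun p =>
      !((PySem.List.enumerate P 0).any (fun q =>
        pyProperSubset q.2 p.2 || (PySem.Set.equal q.2 p.2 && decide (q.1 < p.1)))))).Pairwise
      (fun a b => a.1 < b.1) :=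
    List.Pairwise.sublist (List.filter_sublist) (PySem.List.pairwise_lt_enumerate P 0)
  rw [sort_bridge _ hfilfst, sorted_filter_comm]
  refine congrArg (List.map _) (List.filter_congr ?_)
  intro p hpS
  have hpE : p ∈ PySem.List.enumerate P 0 := (PySem.List.mem_sorted _ _ _ p).mp hpS
  have h1 := cond_conv P hnd p hpE
  have h2 := (PySem.List.sorted_perm (PySem.List.enumerate P 0) kf false).any_eq
    (f := fun q => ltkB q p && PySem.Set.issubset q.2 p.2)
  rw [h2, ← h1]

-- ===== VERDICT (by name: the statement is the Claim_ definition above) =====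
theorem ei_multiply_nd_spec : Claim_equal_ei_multiply_nd := by
  intro conceptA conceptB _
  unfold Spec_ei_multiply_nd ei_multiply_nd ei_multiply_nd_alt
  simp only [union_ofList]
  rw [a_result_eq_pairs]
  rw [main_eq (pairsOf conceptA conceptB)]
  · rfl
  · intro s hs
    simp only [pairsOf, List.mem_flatMap, List.mem_map] at hs
    obtain ⟨a, _, b, _, rfl⟩ := hs
    exact PySem.Set.nodup_ofList _
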